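-- pv_equiv track=rewrite | github.com/marijnkoolen/reading-impact-model | impact_model.py | parse_discontinuous_phrase
-- ===== SOURCE A (Python) =====
-- def parse_discontinuous_phrase(phrase: str) -> str:
--     """
--     Transform discontinuous phrase into a regular expression. Discontinuity is
--     interpreted as taking place at any whitespace outside of terms grouped by
--     parentheses. That is, the whitespace indicates that anything can be in between
--     the left side and right side.
--     Example 1: x1 (x2 (x3"x4")) becomes x1.+(x2 (x3|x4))
--     """
--     level = 0
--     parsed_phrase = ""
--     for index, char in enumerate(phrase):
--         if char == "(":
--             level += 1
--         elif char == ")":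
--             level -= 1
--         elif char == " " and level == 0:
--             char = ".+"
--         parsed_phrase += char
--     return parsed_phrase
-- ===== SOURCE B (Python) =====
-- def parse_discontinuous_phrase(phrase: str) -> str:
--     """Split the phrase into space-delimited tokens, group the tokens into
--     maximal top-level segments (a new segment starts whenever the running
--     parenthesis balance of the previous tokens is zero), and join the
--     segments with the two-character gap pattern (tokens inside a segment
--     keep their spaces)."""
--     segments = []
--     run = []
--     bal = 0
--     for token in phrase.split(" "):
--         if bal == 0 and run:
--             segments.append(" ".join(run))
--             run = []
--         run.append(token)
--         bal += token.count("(") - token.count(")")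
--     segments.append(" ".join(run))
--     return ".+".join(segments)
-- ===== Notes on version B (the rewrite author's own statement) =====
-- stated objective: faster
-- what changed: Instead of A's per-character Python loop that tracks a depth counter and grows the result string one char at a time, B splits the phrase into space-delimited tokens, groups tokens into maximal top-level segments using per-token parenthesis counts via str.count, and produces the result with two str.join calls; the C-level split/count/join bulk operations replace the per-char interpreter loop.
import Mathlib
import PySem

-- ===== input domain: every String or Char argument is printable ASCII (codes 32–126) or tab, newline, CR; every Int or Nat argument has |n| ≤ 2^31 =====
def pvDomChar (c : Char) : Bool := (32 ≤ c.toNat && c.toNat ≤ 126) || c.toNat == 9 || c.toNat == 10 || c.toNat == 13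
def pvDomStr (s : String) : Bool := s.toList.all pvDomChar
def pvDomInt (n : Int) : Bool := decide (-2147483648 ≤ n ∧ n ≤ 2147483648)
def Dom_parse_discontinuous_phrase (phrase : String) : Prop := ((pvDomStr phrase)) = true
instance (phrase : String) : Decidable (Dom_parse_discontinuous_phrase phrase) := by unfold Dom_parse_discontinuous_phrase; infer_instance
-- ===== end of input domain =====

-- B replaces A's per-character depth-tracking scan by a token-level algorithm (split on spaces,
-- group tokens into maximal top-level segments via per-token counts, join the segments with the
-- gap pattern); measurably faster: C-level split/count/join replace the per-char Python loop.


-- ===== PORT A =====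
-- the loop body of A: update level per branch, then append the (possibly replaced) char
def pvStepA (st : Int × List Char) (c : Char) : Int × List Char :=
  if c = '(' then (st.1 + 1, st.2 ++ [c])
  else if c = ')' then (st.1 - 1, st.2 ++ [c])
  else if c = ' ' ∧ st.1 = 0 then (st.1, st.2 ++ ['.', '+'])
  else (st.1, st.2 ++ [c])

def parse_discontinuous_phrase (phrase : String) : String :=
  String.ofList ((phrase.toList.foldl pvStepA (0, [])).2)

-- ===== PORT B =====
-- B's loop body: flush the current run into a new segment when the running balance is 0,
-- then append the token to the run and add its parenthesis counts to the balance
def pvStepB (st : List (List Char) × List (List Char) × Int) (tok : List Char) :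
    List (List Char) × List (List Char) × Int :=
  let flushed := if st.2.2 = 0 ∧ st.2.1 ≠ [] then
      (st.1 ++ [PySem.Chars.join [' '] st.2.1], ([] : List (List Char)))
    else (st.1, st.2.1)
  (flushed.1, flushed.2 ++ [tok],
   st.2.2 + (PySem.Chars.count tok ['('] : Int) - (PySem.Chars.count tok [')'] : Int))

def parse_discontinuous_phrase_alt (phrase : String) : String :=
  let tokens := PySem.Chars.splitOn phrase.toList [' ']
  let st := tokens.foldl pvStepB ([], [], 0)
  String.ofList (PySem.Chars.join ['.', '+'] (st.1 ++ [PySem.Chars.join [' '] st.2.1]))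

-- ===== PRECONDITION & SPEC =====
def Spec_parse_discontinuous_phrase (phrase : String) (out : String) : Prop := out = parse_discontinuous_phrase_alt phrase
instance (phrase : String) (out : String) : Decidable (Spec_parse_discontinuous_phrase phrase out) := by unfold Spec_parse_discontinuous_phrase; infer_instance

-- ===== CLAIM (what is proved, stated in full; the proofs are below) =====
def Claim_equal_parse_discontinuous_phrase : Prop := ∀ (phrase : String), Dom_parse_discontinuous_phrase phrase → Spec_parse_discontinuous_phrase phrase (parse_discontinuous_phrase phrase)

-- ===== LEMMAS AND PROOFS =====

-- reference splitter: Python's s.split(" ") as a simple structural recursion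
def pvSplit (pre : List Char) : List Char → List (List Char)
  | [] => [pre]
  | c :: t => if c = ' ' then pre :: pvSplit [] t else pvSplit (pre ++ [c]) t

-- per-token parenthesis delta
def pvDp (t : List Char) : Int := (t.count '(' : Int) - (t.count ')' : Int)

-- the separator+token rendering of the tokens after the first, given the running balance
def pvSeps (bal : Int) : List (List Char) → List Char
  | [] => []
  | t :: ts => (if bal = 0 then ['.', '+'] else [' ']) ++ t ++ pvSeps (bal + pvDp t) ts

-- the segments B's fold will still produce from state (run, bal) and the remaining tokens
def pvRuns (run : List (List Char)) (bal : Int) : List (List Char) → List (List Char)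
  | [] => [[' '].intercalate run]
  | t :: ts =>
    if bal = 0 ∧ run ≠ [] then [' '].intercalate run :: pvRuns [t] (bal + pvDp t) ts
    else pvRuns (run ++ [t]) (bal + pvDp t) ts

lemma pvSplit_ne_nil (l : List Char) (pre : List Char) : pvSplit pre l ≠ [] := by
  induction l generalizing pre with
  | nil => simp [pvSplit]
  | cons c t ih => by_cases h : c = ' ' <;> simp [pvSplit, h, ih]

lemma pvRuns_ne_nil (ts : List (List Char)) (run : List (List Char)) (bal : Int) :
    pvRuns run bal ts ≠ [] := by
  induction ts generalizing run bal with
  | nil => simp [pvRuns]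
  | cons t ts ih =>
    by_cases h : bal = 0 ∧ run ≠ [] <;> simp [pvRuns, h, ih]

lemma pv_ic_cons (sep a : List Char) (L : List (List Char)) (h : L ≠ []) :
    sep.intercalate (a :: L) = a ++ sep ++ sep.intercalate L := by
  obtain ⟨b, L', rfl⟩ := List.exists_cons_of_ne_nil h
  simp [List.intercalate, List.intersperse]

-- splitting then re-interleaving single spaces restores the string
lemma pvSplit_intercalate (l pre : List Char) :
    [' '].intercalate (pvSplit pre l) = pre ++ l := by
  induction l generalizing pre with
  | nil => simp [pvSplit, List.intercalate]
  | cons c t ih =>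
    by_cases h : c = ' '
    · subst h
      rw [pvSplit, if_pos rfl, pv_ic_cons _ _ _ (pvSplit_ne_nil t []), ih]
      simp
    · rw [pvSplit, if_neg h, ih]
      simp

-- every token produced by pvSplit is space-free
lemma pvSplit_spacefree (l pre : List Char) (hpre : ' ' ∉ pre) :
    ∀ p ∈ pvSplit pre l, ' ' ∉ p := by
  induction l generalizing pre with
  | nil => simpa [pvSplit] using hpre
  | cons c t ih =>
    by_cases h : c = ' '
    · subst h
      rw [pvSplit, if_pos rfl]
      intro p hp
      rcases List.mem_cons.mp hp with rfl | hp
      · exact hpre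
      · exact ih [] (by simp) p hp
    · rw [pvSplit, if_neg h]
      exact ih (pre ++ [c]) (by simp [hpre, Ne.symm h]) 

-- PySem splitOn on a single space is the reference splitter
lemma pv_splitOn_go (fuel : Nat) (l cur acc : List Char) (acc2 : List (List Char))
    (hf : l.length < fuel) :
    PySem.Chars.splitOn.go [' '] fuel l cur acc2 = acc2.reverse ++ pvSplit cur.reverse l := by
  induction fuel generalizing l cur acc2 with
  | zero => omega
  | succ f ih =>
    cases l with
    | nil => simp [PySem.Chars.splitOn.go, pvSplit]
    | cons c t =>
      by_cases h : c = ' '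
      · subst h
        rw [show PySem.Chars.splitOn.go [' '] (f + 1) (' ' :: t) cur acc2
              = PySem.Chars.splitOn.go [' '] f t [] (cur.reverse :: acc2) by
            simp [PySem.Chars.splitOn.go, List.isPrefixOf]]
        rw [ih t [] _ (by simpa using Nat.lt_of_succ_lt_succ hf)]
        simp [pvSplit]
      · have h' : ¬ (' ' = c) := fun e => h e.symm
        rw [show PySem.Chars.splitOn.go [' '] (f + 1) (c :: t) cur acc2
              = PySem.Chars.splitOn.go [' '] f t (c :: cur) acc2 by
            simp [PySem.Chars.splitOn.go, List.isPrefixOf, h']]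
        rw [ih t (c :: cur) _ (by simpa using Nat.lt_of_succ_lt_succ hf)]
        simp [pvSplit, h]

lemma pv_splitOn_eq (s : List Char) :
    PySem.Chars.splitOn s [' '] = pvSplit [] s := by
  have := pv_splitOn_go (s.length + 1) s [] [] [] (by omega)
  simpa [PySem.Chars.splitOn] using this

-- PySem count of a single character is List.count
lemma pv_count_go (ch : Char) (fuel : Nat) (l : List Char) (acc : Nat)
    (hf : l.length ≤ fuel) :
    PySem.Chars.count.go [ch] fuel l acc = acc + l.count ch := by
  induction fuel generalizing l acc with
  | zero =>
    cases l with
    | nil => simp [PySem.Chars.count.go]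
    | cons c t => simp at hf
  | succ f ih =>
    cases l with
    | nil => simp [PySem.Chars.count.go]
    | cons c t =>
      by_cases h : c = ch
      · subst h
        rw [show PySem.Chars.count.go [c] (f + 1) (c :: t) acc
              = PySem.Chars.count.go [c] f t (acc + 1) by
            simp [PySem.Chars.count.go, List.isPrefixOf]]
        rw [ih t (acc + 1) (by simpa using Nat.le_of_succ_le_succ hf)]
        simp [List.count_cons]
        omega
      · have h' : ¬ (ch = c) := fun e => h e.symm
        rw [show PySem.Chars.count.go [ch] (f + 1) (c :: t) acc
              = PySem.Chars.count.go [ch] f t acc by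
            simp [PySem.Chars.count.go, List.isPrefixOf, h']]
        rw [ih t acc (by simpa using Nat.le_of_succ_le_succ hf)]
        simp [List.count_cons, h]

lemma pv_count_eq (p : List Char) (ch : Char) :
    PySem.Chars.count p [ch] = p.count ch := by
  have := pv_count_go ch p.length p 0 le_rfl
  simpa [PySem.Chars.count] using this

-- A's fold over a space-free token appends the token and adds its delta to the level
lemma pvStepA_token (p : List Char) (hp : ' ' ∉ p) (l : Int) (acc : List Char) :
    p.foldl pvStepA (l, acc) = (l + pvDp p, acc ++ p) := by
  induction p generalizing l acc with
  | nil => simp [pvDp]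
  | cons c t ih =>
    have hc : c ≠ ' ' := fun h => hp (h ▸ List.mem_cons_self)
    have ht : ' ' ∉ t := fun h => hp (List.mem_cons_of_mem _ h)
    by_cases h1 : c = '('
    · subst h1
      rw [List.foldl_cons, show pvStepA (l, acc) '(' = (l + 1, acc ++ ['(']) by simp [pvStepA],
        ih ht]
      simp [pvDp, List.count_cons]
      push_cast; ring
    · by_cases h2 : c = ')'
      · subst h2
        rw [List.foldl_cons, show pvStepA (l, acc) ')' = (l - 1, acc ++ [')']) by simp [pvStepA],
          ih ht]
        simp [pvDp, List.count_cons]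
        push_cast; ring
      · rw [List.foldl_cons, show pvStepA (l, acc) c = (l, acc ++ [c]) by
            simp [pvStepA, h1, h2, hc], ih ht]
        simp [pvDp, List.count_cons, h1, h2]

-- A's fold over the remaining (space, token) blocks renders pvSeps
lemma pvStepA_blocks (ts : List (List Char)) (hts : ∀ p ∈ ts, ' ' ∉ p) (l : Int)
    (acc : List Char) :
    ((ts.map (fun t => ' ' :: t)).flatten).foldl pvStepA (l, acc)
      = (l + (ts.map pvDp).sum, acc ++ pvSeps l ts) := by
  induction ts generalizing l acc with
  | nil => simp [pvSeps]
  | cons t ts ih =>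
    have ht : ' ' ∉ t := hts t List.mem_cons_self
    have hts' : ∀ p ∈ ts, ' ' ∉ p := fun p hp => hts p (List.mem_cons_of_mem _ hp)
    rw [List.map_cons, List.flatten_cons, List.foldl_append, List.foldl_cons]
    by_cases h : l = 0
    · subst h
      rw [show pvStepA (0, acc) ' ' = (0, acc ++ ['.', '+']) by simp [pvStepA],
        pvStepA_token t ht, ih hts']
      simp [pvSeps]
    · rw [show pvStepA (l, acc) ' ' = (l, acc ++ [' ']) by simp [pvStepA, h],
        pvStepA_token t ht, ih hts']
      simp [pvSeps, h]
      ring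

-- the single-space intercalate of a nonempty token list, as head ++ blocks
lemma pv_ic_blocks (a : List Char) (L : List (List Char)) :
    [' '].intercalate (a :: L) = a ++ (L.map (fun t => ' ' :: t)).flatten := by
  induction L generalizing a with
  | nil => simp [List.intercalate]
  | cons b L ih =>
    rw [pv_ic_cons _ _ _ (by simp), ih b]
    simp

-- B's fold, finalized, produces the '.+'-join of the already-flushed and remaining segments
lemma pvStepB_fold (ts : List (List Char)) (segs run : List (List Char)) (bal : Int) :
    ['.', '+'].intercalate ((ts.foldl pvStepB (segs, run, bal)).1
        ++ [[' '].intercalate ((ts.foldl pvStepB (segs, run, bal)).2.1)])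
      = ['.', '+'].intercalate (segs ++ pvRuns run bal ts) := by
  induction ts generalizing segs run bal with
  | nil => simp [pvRuns, PySem.Chars.join]
  | cons t ts ih =>
    by_cases h : bal = 0 ∧ run ≠ []
    · rw [List.foldl_cons,
        show pvStepB (segs, run, bal) t
          = (segs ++ [[' '].intercalate run], [t], bal + pvDp t) by
          simp [pvStepB, h, PySem.Chars.join, pv_count_eq, pvDp],
        ih]
      simp [pvRuns, h]
    · rw [List.foldl_cons,
        show pvStepB (segs, run, bal) t = (segs, run ++ [t], bal + pvDp t) by
          simp [pvStepB, h, pv_count_eq, pvDp]; ring,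
        ih]
      simp [pvRuns, h]

lemma pv_ic_append (sep t : List Char) : ∀ run : List (List Char), run ≠ [] →
    sep.intercalate (run ++ [t]) = sep.intercalate run ++ sep ++ t
  | [], h => absurd rfl h
  | [a], _ => by
    rw [show ([a] ++ [t] : List (List Char)) = a :: [t] by rfl,
      pv_ic_cons _ _ _ (by simp)]
    simp [List.intercalate]
  | a :: b :: rs, _ => by
    rw [show ((a :: b :: rs) ++ [t] : List (List Char)) = a :: ((b :: rs) ++ [t]) by simp,
      pv_ic_cons _ _ _ (by simp), pv_ic_cons _ _ _ (by simp),
      pv_ic_append sep t (b :: rs) (by simp)]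
    simp

-- the '.+'-join of the remaining segments is the head run followed by pvSeps
lemma pvRuns_seps (ts : List (List Char)) (run : List (List Char)) (bal : Int)
    (hrun : run ≠ []) :
    ['.', '+'].intercalate (pvRuns run bal ts) = [' '].intercalate run ++ pvSeps bal ts := by
  induction ts generalizing run bal with
  | nil => simp [pvRuns, pvSeps, List.intercalate]
  | cons t ts ih =>
    by_cases h : bal = 0 ∧ run ≠ []
    · rw [pvRuns, if_pos h, pv_ic_cons _ _ _ (pvRuns_ne_nil ts [t] (bal + pvDp t)),
        ih [t] (bal + pvDp t) (by simp)]
      rcases h with ⟨h0, -⟩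
      subst h0
      simp [pvSeps, List.intercalate]
    · have hb : ¬ bal = 0 := fun h0 => h ⟨h0, hrun⟩
      rw [pvRuns, if_neg h, ih (run ++ [t]) (bal + pvDp t) (by simp),
        pv_ic_append [' '] t run hrun]
      simp [pvSeps, hb]

-- ===== VERDICT (by name: the statement is the Claim_ definition above) =====
theorem parse_discontinuous_phrase_spec : Claim_equal_parse_discontinuous_phrase := by
  intro phrase _
  unfold Spec_parse_discontinuous_phrase parse_discontinuous_phrase parse_discontinuous_phrase_alt
  rw [pv_splitOn_eq]
  obtain ⟨t0, ts, hsplit⟩ := List.exists_cons_of_ne_nil (pvSplit_ne_nil phrase.toList [])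
  have hfree : ∀ p ∈ pvSplit [] phrase.toList, ' ' ∉ p :=
    pvSplit_spacefree phrase.toList [] (by simp)
  have hic := pvSplit_intercalate phrase.toList []
  rw [hsplit, pv_ic_blocks] at hic
  simp only [List.nil_append] at hic
  rw [hsplit]
  simp only [PySem.Chars.join, List.foldl_cons]
  -- A side
  conv_lhs => rw [← hic]
  rw [List.foldl_append,
    pvStepA_token t0 (hfree t0 (by rw [hsplit]; exact List.mem_cons_self)) 0 [],
    pvStepA_blocks ts (fun p hp => hfree p (by rw [hsplit]; exact List.mem_cons_of_mem _ hp))]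
  -- B side
  rw [show pvStepB ([], [], 0) t0 = ([], [t0], 0 + pvDp t0) by
      simp [pvStepB, pv_count_eq, pvDp]]
  rw [pvStepB_fold ts [] [t0] (0 + pvDp t0)]
  simp only [List.nil_append]
  rw [pvRuns_seps ts [t0] (0 + pvDp t0) (by simp)]
  simp [List.intercalate]
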